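-- pv_equiv track=rewrite | github.com/MaastrichtU-IDS/semanticscience | trunk/tools/MolSurfGenService/MolSurfaceGen32/chimera/share/SimpleSession/save.py | summarizeSequentialVals
-- ===== SOURCE A (Python) =====
-- def summarizeSequentialVals(vals):
-- 	summary = []
-- 	startVal = prevVal = None
-- 	for v in vals:
-- 		if startVal == None:
-- 			startVal = prevVal = v
-- 			continue
-- 		if v == prevVal + 1:
-- 			prevVal = v
-- 		else:
-- 			summary.append((startVal, prevVal - startVal + 1))
-- 			startVal = prevVal = v
-- 	if startVal != None:
-- 		summary.append((startVal, prevVal - startVal + 1))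
-- 	return summary
-- ===== SOURCE B (Python) =====
-- def summarizeSequentialVals(vals):
-- 	# Staged pipeline with no mutable run state: compute break flags with a
-- 	# pairwise zip, select run starts and run ends by comprehension, pair them.
-- 	flags = [True] + [a + 1 != b for a, b in zip(vals, vals[1:])]
-- 	starts = [v for v, f in zip(vals, flags) if f]
-- 	ends = [a for a, f in zip(vals, flags[1:]) if f] + vals[-1:]
-- 	return [(s, e - s + 1) for s, e in zip(starts, ends)]
-- ===== Notes on version B (the rewrite author's own statement) =====
-- stated objective: alternative
-- what changed: Replaces A's stateful sentinel loop (startVal/prevVal state machine with a final flush) by a stateless staged pipeline: pairwise-zip break flags, two comprehensions selecting run starts and run ends, then a zip pairing them into (start, length).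
import Mathlib
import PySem

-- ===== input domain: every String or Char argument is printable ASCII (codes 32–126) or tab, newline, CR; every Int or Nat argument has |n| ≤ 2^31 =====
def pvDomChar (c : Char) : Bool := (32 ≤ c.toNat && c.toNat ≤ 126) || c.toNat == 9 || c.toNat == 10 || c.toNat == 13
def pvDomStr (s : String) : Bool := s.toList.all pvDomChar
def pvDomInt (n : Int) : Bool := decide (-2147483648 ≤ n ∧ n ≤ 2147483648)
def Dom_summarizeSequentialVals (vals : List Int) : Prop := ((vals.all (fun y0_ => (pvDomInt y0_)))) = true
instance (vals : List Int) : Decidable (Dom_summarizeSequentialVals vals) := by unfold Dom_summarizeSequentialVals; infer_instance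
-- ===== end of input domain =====

-- B replaces A's sentinel state-machine loop by a stateless staged pipeline
-- (pairwise break flags, start/end selection by comprehension, final zip);
-- objective: alternative, same O(n) cost.


-- ===== PORT A =====
-- A's loop state: summary (reversed; Python appends at the end) and the
-- optional (startVal, prevVal) pair (none ↔ Python's None sentinel).
def pvStepA (st : List (Int × Int) × Option (Int × Int)) (v : Int) :
    List (Int × Int) × Option (Int × Int) :=
  match st with
  | (summary, none) => (summary, some (v, v))
  | (summary, some (s, p)) =>
      if v = p + 1 then (summary, some (s, v))
      else ((s, p - s + 1) :: summary, some (v, v))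

def summarizeSequentialVals (vals : List Int) : List (Int × Int) :=
  let st := vals.foldl pvStepA ([], none)
  (match st.2 with
   | none => st.1
   | some (s, p) => (s, p - s + 1) :: st.1).reverse

-- ===== PORT B =====
-- flags = [True] + [a + 1 != b for a, b in zip(vals, vals[1:])]
-- starts = [v for v, f in zip(vals, flags) if f]
-- ends   = [a for a, f in zip(vals, flags[1:]) if f] + vals[-1:]
-- return [(s, e - s + 1) for s, e in zip(starts, ends)]
def summarizeSequentialVals_alt (vals : List Int) : List (Int × Int) :=
  let flags : List Bool :=
    true :: (vals.zip (PySem.List.slice vals (some 1) none)).map (fun ab => !(ab.1 + 1 == ab.2))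
  let starts := ((vals.zip flags).filter (fun vf => vf.2)).map (fun vf => vf.1)
  let ends := ((vals.zip (PySem.List.slice flags (some 1) none)).filter (fun af => af.2)).map (fun af => af.1)
      ++ PySem.List.slice vals (some (-1)) none
  (starts.zip ends).map (fun se => (se.1, se.2 - se.1 + 1))

-- ===== PRECONDITION & SPEC =====
def Spec_summarizeSequentialVals (vals : List Int) (out : List (Int × Int)) : Prop := out = summarizeSequentialVals_alt vals
instance (vals : List Int) (out : List (Int × Int)) : Decidable (Spec_summarizeSequentialVals vals out) := by unfold Spec_summarizeSequentialVals; infer_instance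

-- ===== CLAIM (what is proved, stated in full; the proofs are below) =====
def Claim_equal_summarizeSequentialVals : Prop := ∀ (vals : List Int), Dom_summarizeSequentialVals vals → Spec_summarizeSequentialVals vals (summarizeSequentialVals vals)

-- ===== LEMMAS AND PROOFS =====

-- Reference function: the summary of runs, given the current run (s ‥ p) and the rest.
def pvF (s p : Int) : List Int → List (Int × Int)
  | [] => [(s, p - s + 1)]
  | v :: r => if v = p + 1 then pvF s v r else (s, p - s + 1) :: pvF v v r

theorem pvF_ne_nil (r : List Int) (s p : Int) : pvF s p r ≠ [] := by
  induction r generalizing s p with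
  | nil => simp [pvF]
  | cons v r ih =>
    simp only [pvF]
    split
    · exact ih s v
    · simp

-- Changing only the recorded start shifts the head pair and keeps the tail.
theorem pvF_shift (r : List Int) (p s : Int) :
    pvF s p r = match pvF p p r with
                | (_, l) :: t => (s, (p - s) + l) :: t
                | [] => [] := by
  induction r generalizing p s with
  | nil => simp [pvF]
  | cons v r ih =>
    simp only [pvF]
    by_cases h : v = p + 1
    · rw [if_pos h, if_pos h, ih v s, ih v p]
      cases hv : pvF v v r with
      | nil => exact absurd hv (pvF_ne_nil r v v)
      | cons hd t => cases hd; simp; omega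
    · rw [if_neg h, if_neg h]
      simp

-- A's fold, flushed and reversed, computes pvF.
theorem pvA_fold (vals : List Int) (summary : List (Int × Int)) (s p : Int) :
    (match (vals.foldl pvStepA (summary, some (s, p))).2 with
     | none => (vals.foldl pvStepA (summary, some (s, p))).1
     | some (s', p') => (s', p' - s' + 1) :: (vals.foldl pvStepA (summary, some (s, p))).1).reverse
      = summary.reverse ++ pvF s p vals := by
  induction vals generalizing summary s p with
  | nil => simp [pvF]
  | cons v r ih =>
    simp only [List.foldl_cons, pvStepA, pvF]
    by_cases h : v = p + 1
    · rw [if_pos h, if_pos h]; exact ih summary s v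
    · rw [if_neg h, if_neg h]
      rw [ih ((s, p - s + 1) :: summary) v v]
      simp

-- B's break-flag recursion for starts: elements opening a new run, given the predecessor.
def pvS (p : Int) : List Int → List Int
  | [] => []
  | w :: r => if p + 1 = w then pvS w r else w :: pvS w r

-- B's break-flag recursion for ends: elements directly followed by a break.
def pvE : List Int → List Int
  | [] => []
  | [_] => []
  | a :: b :: r => if a + 1 = b then pvE (b :: r) else a :: pvE (b :: r)

-- starts bridge: the zip/filter/map comprehension equals pvS.
theorem pvS_bridge (rest : List Int) (v : Int) :
    ((rest.zip (((v :: rest).zip rest).map (fun ab => !(ab.1 + 1 == ab.2)))).filter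
        (fun vf => vf.2)).map (fun vf => vf.1) = pvS v rest := by
  induction rest generalizing v with
  | nil => simp [pvS]
  | cons w r ih =>
    by_cases h : v + 1 = w
    · simp [pvS, h, ih w]
    · simp [pvS, h, ih w]

-- ends bridge: the zip/filter/map comprehension equals pvE.
theorem pvE_bridge (vals : List Int) :
    ((vals.zip ((vals.zip vals.tail).map (fun ab => !(ab.1 + 1 == ab.2)))).filter
        (fun af => af.2)).map (fun af => af.1) = pvE vals := by
  induction vals with
  | nil => simp [pvE]
  | cons a l ih =>
    cases l with
    | nil => simp [pvE]
    | cons b r =>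
      by_cases h : a + 1 = b
      · simp only [pvE, if_pos h]
        simp only [List.tail_cons] at ih ⊢
        simpa [List.filter_cons, h] using ih
      · simp only [pvE, if_neg h]
        simp only [List.tail_cons] at ih ⊢
        simpa [List.filter_cons, h] using ih

-- drop-all-but-one computes the last element of v :: rest.
theorem pvDropLast1 (rest : List Int) (v : Int) :
    (v :: rest).drop ((v :: rest).length - 1) = [rest.getLastD v] := by
  induction rest generalizing v with
  | nil => simp
  | cons w r ih =>
    rw [List.getLastD_cons]
    simpa using ih w

-- Main B lemma: pairing starts with ends computes pvF.
theorem pvB_main (rest : List Int) (v : Int) :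
    ((v :: pvS v rest).zip (pvE (v :: rest) ++ [rest.getLastD v])).map
        (fun se => (se.1, se.2 - se.1 + 1)) = pvF v v rest := by
  induction rest generalizing v with
  | nil => simp [pvS, pvE, pvF]
  | cons w r ih =>
    simp only [pvS, pvE, pvF, List.getLastD_cons]
    by_cases h : v + 1 = w
    · simp only [if_pos h, if_pos (show w = v + 1 by omega)]
      rw [pvF_shift r w v]
      cases hF : pvF w w r with
      | nil => exact absurd hF (pvF_ne_nil r w w)
      | cons hd t =>
        obtain ⟨s0, l0⟩ := hd
        have hih := ih w
        rw [hF] at hih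
        cases hE : pvE (w :: r) ++ [r.getLastD w] with
        | nil => simp at hE
        | cons e ends' =>
          rw [hE] at hih
          simp only [List.zip_cons_cons, List.map_cons] at hih ⊢
          rw [List.cons_eq_cons] at hih
          obtain ⟨h1, h2⟩ := hih
          obtain ⟨hw, hl⟩ : w = s0 ∧ e - w + 1 = l0 := by simpa using h1
          rw [h2]
          show (v, e - v + 1) :: t = (v, w - v + l0) :: t
          refine List.cons_eq_cons.mpr ⟨?_, rfl⟩
          rw [Prod.mk.injEq]
          exact ⟨rfl, by omega⟩
    · simp only [if_neg h, if_neg (show ¬ w = v + 1 by omega)]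
      simp only [List.cons_append, List.zip_cons_cons, List.map_cons]
      exact List.cons_eq_cons.mpr ⟨rfl, ih w⟩

-- ===== VERDICT (by name: the statement is the Claim_ definition above) =====
theorem summarizeSequentialVals_spec : Claim_equal_summarizeSequentialVals := by
  intro vals _
  unfold Spec_summarizeSequentialVals summarizeSequentialVals summarizeSequentialVals_alt
  cases vals with
  | nil => simp
  | cons v rest =>
    simp only [List.foldl_cons, pvStepA]
    have hA := pvA_fold rest [] v v
    simp only [List.reverse_nil, List.nil_append] at hA
    rw [hA]
    simp only [PySem.List.slice_from_one, PySem.List.slice_from_neg_one, List.tail_cons]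
    rw [pvDropLast1]
    have hS := pvS_bridge rest v
    have hE := pvE_bridge (v :: rest)
    simp only [List.tail_cons] at hE
    simp only [List.zip_cons_cons]
    rw [List.filter_cons_of_pos (by simp)]
    simp only [List.map_cons]
    rw [hS, hE]
    exact (pvB_main rest v).symm
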